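-- pv_equiv track=rewrite | github.com/KirillMironov/python_tests | test/test.py | ret_index
-- ===== SOURCE A (Python) =====
-- alphabet = ['a', 'b', 'c', 'd', 'e', 'f', 'g', 'h', 'i', 'j', 'k', 'l', 'm', 'n', 'o', 'p', 'q', 'r', 's', 't', 'u',
--             'v', 'w', 'x', 'y', 'z']
--
-- def ret_index(elm):
--     for index in range(len(alphabet)):
--         if elm == alphabet[index]:
--             if index < 24:
--                 return alphabet[index+2]
--             elif index == 24:
--                 return alphabet[0]
--             elif index == 25:
--                 return alphabet[1]
-- ===== SOURCE B (Python) =====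
-- def ret_index(elm):
--     if isinstance(elm, str) and len(elm) == 1 and 'a' <= elm <= 'z':
--         return chr((ord(elm) - ord('a') + 2) % 26 + ord('a'))
--     return None
-- ===== Notes on version B (the rewrite author's own statement) =====
-- stated objective: idiomatic
-- what changed: Replaced the linear scan over the 26-letter alphabet list with its special-cased wrap branches by a single range guard plus closed-form modular ord/chr arithmetic.
import Mathlib
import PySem

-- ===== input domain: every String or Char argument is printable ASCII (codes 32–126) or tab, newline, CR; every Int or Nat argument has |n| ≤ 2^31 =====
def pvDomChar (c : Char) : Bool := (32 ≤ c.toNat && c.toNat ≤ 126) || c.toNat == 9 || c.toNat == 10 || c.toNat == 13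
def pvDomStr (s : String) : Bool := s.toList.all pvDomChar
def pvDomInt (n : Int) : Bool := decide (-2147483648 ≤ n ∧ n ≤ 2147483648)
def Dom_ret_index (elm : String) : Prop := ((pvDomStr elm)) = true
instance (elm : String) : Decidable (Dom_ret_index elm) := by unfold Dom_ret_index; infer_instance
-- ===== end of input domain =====

-- B replaces A's linear scan of the alphabet list (with hand-written wrap cases for 'y'/'z')
-- by a single range guard plus closed-form modular arithmetic on the character code (objective: idiomatic).

-- ===== PORT A =====
def pyAlphabet : List String :=
  ["a","b","c","d","e","f","g","h","i","j","k","l","m","n","o","p","q","r","s","t","u",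
   "v","w","x","y","z"]

-- the 'for index in range(len(alphabet))' loop with early returns; falling through continues
def retIndexGo (elm : String) : List Nat → Option String
  | [] => none
  | index :: rest =>
    if elm == pyAlphabet.getD index "" then
      if index < 24 then some (pyAlphabet.getD (index + 2) "")
      else if index == 24 then some (pyAlphabet.getD 0 "")
      else if index == 25 then some (pyAlphabet.getD 1 "")
      else retIndexGo elm rest
    else retIndexGo elm rest

def ret_index (elm : String) : Option String :=
  retIndexGo elm (List.range pyAlphabet.length)

-- ===== PORT B =====
def ret_index_alt (elm : String) : Option String :=
  match elm.toList with
  | [c] =>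
    if 'a' ≤ c ∧ c ≤ 'z' then
      some (String.ofList [Char.ofNat ((c.toNat - 97 + 2) % 26 + 97)])
    else none
  | _ => none

-- ===== PRECONDITION & SPEC =====
def Spec_ret_index (elm : String) (out : Option String) : Prop := out = ret_index_alt elm
instance (elm : String) (out : Option String) : Decidable (Spec_ret_index elm out) := by unfold Spec_ret_index; infer_instance

-- ===== CLAIM (what is proved, stated in full; the proofs are below) =====
def Claim_equal_ret_index : Prop := ∀ (elm : String), Dom_ret_index elm → Spec_ret_index elm (ret_index elm)

-- ===== LEMMAS AND PROOFS =====

-- a single lowercase character is one of the 26 letters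
theorem char_mem_lower (c : Char) (h1 : 'a' ≤ c) (h2 : c ≤ 'z') :
    c ∈ ['a','b','c','d','e','f','g','h','i','j','k','l','m',
         'n','o','p','q','r','s','t','u','v','w','x','y','z'] := by
  have hn1 : 97 ≤ c.toNat := UInt32.le_iff_toNat_le.mp h1
  have hn2 : c.toNat ≤ 122 := UInt32.le_iff_toNat_le.mp h2
  have key : ∀ n, c.toNat = n → c = Char.ofNat n := by
    intro n hn
    have := Char.ofNat_toNat c
    rw [hn] at this
    exact this.symm
  interval_cases hh : c.toNat <;> rw [key _ rfl] <;> decide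

-- A's loop returns None when elm matches no visited alphabet entry
theorem retIndexGo_none (elm : String) (l : List Nat)
    (H : ∀ i ∈ l, ¬ elm = pyAlphabet.getD i "") : retIndexGo elm l = none := by
  induction l with
  | nil => rfl
  | cons i rest ih =>
    have hne : ¬ (elm == pyAlphabet.getD i "") = true := by
      simpa using H i (List.mem_cons_self)
    simp only [retIndexGo, if_neg hne]
    exact ih (fun j hj => H j (List.mem_cons_of_mem _ hj))

theorem ret_index_none_of_not_mem (elm : String) (h : elm ∉ pyAlphabet) :
    ret_index elm = none := by
  apply retIndexGo_none
  intro i hi heq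
  apply h
  rw [heq]
  have hlt : i < pyAlphabet.length := List.mem_range.mp hi
  rw [List.getD_eq_getElem _ _ hlt]
  exact List.getElem_mem hlt

-- ===== VERDICT (by name: the statement is the Claim_ definition above) =====
theorem ret_index_spec : Claim_equal_ret_index := by
  intro elm _
  unfold Spec_ret_index
  by_cases h : elm ∈ pyAlphabet
  · fin_cases h <;> decide
  · rw [ret_index_none_of_not_mem elm h]
    rcases hc : elm.toList with _ | ⟨c, _ | ⟨d, rest⟩⟩
    · simp [ret_index_alt, hc]
    · simp only [ret_index_alt, hc]
      split_ifs with hr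
      · exfalso
        apply h
        have hmem := char_mem_lower c hr.1 hr.2
        have helm : elm = String.ofList [c] := by
          have h2 := congrArg String.ofList hc
          rwa [String.ofList_toList] at h2
        fin_cases hmem <;> rw [helm] <;> decide
      · rfl
    · simp [ret_index_alt, hc]
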